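-- pv_equiv track=rewrite | github.com/jeffoxford/autocomplete | main.py | qrlist
-- ===== SOURCE A (Python) =====
-- import string
--
-- charList = string.ascii_lowercase + string.digits
--
-- def qrlist(k) :
--     queryList1 = ['are ' + k + " " + char for char in charList]
--     queryList2 = ['what is ' + k + " " + char for char in charList]
--     queryList3 = ['is ' + k + " " + char for char in charList]
--     queryList4 = ['best ' + k + " " + char for char in charList]
--     queryList5 = [k + " vs " + char for char in charList]
--     queryList6 = [k + " or " + char for char in charList]
--     queryList7 = ['can ' + k + " " + char for char in charList]
--     queryList8 = ['which ' + k + " " + char for char in charList]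
--     queryList9 = ['will ' + k + " " + char for char in charList]
--     queryList10 = ['how ' + k + " " + char for char in charList]
--     queryList11 = ['what are ' + k + " " + char for char in charList]
--     queryList12 = ['do ' + k + " " + char for char in charList]
--     queryList13 = [k + " for " + char for char in charList]
--     queryList14 = ['best ' + k + " for " + char for char in charList]
--     queryList15 = ['difference between ' + k + " and " + char for char in charList]
--     queryList16 = ['what are ' + k +' '+ char for char in charList]
--
--
--     joinedlist = queryList1 + queryList2 + queryList3  + queryList4 + queryList5 + queryList6 + queryList7 +  queryList8 + queryList9 + queryList15 + queryList10+ queryList11+ queryList12+ queryList13+ queryList14+queryList16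
--     return joinedlist
-- ===== SOURCE B (Python) =====
-- import string
--
-- charList = string.ascii_lowercase + string.digits
--
-- # (prefix, middle) templates in the original's output-block order
-- templates = [
--     ("are ", " "), ("what is ", " "), ("is ", " "), ("best ", " "),
--     ("", " vs "), ("", " or "), ("can ", " "), ("which ", " "),
--     ("will ", " "), ("difference between ", " and "), ("how ", " "),
--     ("what are ", " "), ("do ", " "), ("", " for "), ("best ", " for "),
--     ("what are ", " "),
-- ]
--
-- def qrlist(k):
--     # char-major generation: for each character build its 16 queries (one row),
--     # then transpose with zip so the result comes out template-block-major.
--     rows = [[p + k + m + c for (p, m) in templates] for c in charList]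
--     return [q for block in zip(*rows) for q in block]
-- ===== Notes on version B (the rewrite author's own statement) =====
-- stated objective: alternative
-- what changed: B generates the 36x16 matrix character-major (one row of 16 queries per character) from a (prefix, middle) template table and then transposes it with zip, instead of A's 16 separate per-template comprehensions concatenated in a hand-scrambled order.
import Mathlib
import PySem

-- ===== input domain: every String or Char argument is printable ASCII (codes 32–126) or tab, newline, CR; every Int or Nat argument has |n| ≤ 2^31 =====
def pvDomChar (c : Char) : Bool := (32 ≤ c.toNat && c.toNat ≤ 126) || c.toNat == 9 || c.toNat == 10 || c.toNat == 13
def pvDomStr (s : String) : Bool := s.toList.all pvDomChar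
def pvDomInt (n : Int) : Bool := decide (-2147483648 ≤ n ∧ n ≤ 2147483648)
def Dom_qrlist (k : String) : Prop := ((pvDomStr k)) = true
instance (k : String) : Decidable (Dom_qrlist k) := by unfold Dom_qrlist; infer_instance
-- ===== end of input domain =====

-- ===== PORT A =====
-- B builds the query matrix character-major and transposes it (objective: alternative decomposition).
-- Python str concatenation is ported exactly as concatenation of character lists (String.ofList/toList).
def pvCharList : List Char := "abcdefghijklmnopqrstuvwxyz0123456789".toList

def qrlist (k : String) : List String :=
  let queryList1 := pvCharList.map (fun c => String.ofList ("are ".toList ++ k.toList ++ " ".toList ++ [c]))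
  let queryList2 := pvCharList.map (fun c => String.ofList ("what is ".toList ++ k.toList ++ " ".toList ++ [c]))
  let queryList3 := pvCharList.map (fun c => String.ofList ("is ".toList ++ k.toList ++ " ".toList ++ [c]))
  let queryList4 := pvCharList.map (fun c => String.ofList ("best ".toList ++ k.toList ++ " ".toList ++ [c]))
  let queryList5 := pvCharList.map (fun c => String.ofList (k.toList ++ " vs ".toList ++ [c]))
  let queryList6 := pvCharList.map (fun c => String.ofList (k.toList ++ " or ".toList ++ [c]))
  let queryList7 := pvCharList.map (fun c => String.ofList ("can ".toList ++ k.toList ++ " ".toList ++ [c]))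
  let queryList8 := pvCharList.map (fun c => String.ofList ("which ".toList ++ k.toList ++ " ".toList ++ [c]))
  let queryList9 := pvCharList.map (fun c => String.ofList ("will ".toList ++ k.toList ++ " ".toList ++ [c]))
  let queryList10 := pvCharList.map (fun c => String.ofList ("how ".toList ++ k.toList ++ " ".toList ++ [c]))
  let queryList11 := pvCharList.map (fun c => String.ofList ("what are ".toList ++ k.toList ++ " ".toList ++ [c]))
  let queryList12 := pvCharList.map (fun c => String.ofList ("do ".toList ++ k.toList ++ " ".toList ++ [c]))
  let queryList13 := pvCharList.map (fun c => String.ofList (k.toList ++ " for ".toList ++ [c]))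
  let queryList14 := pvCharList.map (fun c => String.ofList ("best ".toList ++ k.toList ++ " for ".toList ++ [c]))
  let queryList15 := pvCharList.map (fun c => String.ofList ("difference between ".toList ++ k.toList ++ " and ".toList ++ [c]))
  let queryList16 := pvCharList.map (fun c => String.ofList ("what are ".toList ++ k.toList ++ " ".toList ++ [c]))
  queryList1 ++ queryList2 ++ queryList3 ++ queryList4 ++ queryList5 ++ queryList6 ++
    queryList7 ++ queryList8 ++ queryList9 ++ queryList15 ++ queryList10 ++ queryList11 ++
    queryList12 ++ queryList13 ++ queryList14 ++ queryList16

-- ===== PORT B =====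
def pvTemplates : List (String × String) :=
  [("are ", " "), ("what is ", " "), ("is ", " "), ("best ", " "),
   ("", " vs "), ("", " or "), ("can ", " "), ("which ", " "),
   ("will ", " "), ("difference between ", " and "), ("how ", " "),
   ("what are ", " "), ("do ", " "), ("", " for "), ("best ", " for "),
   ("what are ", " ")]

-- Hand port of Python's zip(*rows) (exact: zip yields, per step i, the list of i-th elements
-- of all rows, stopping after min-row-length steps; pvZipGo is run for exactly that many steps).
def pvZipGo {α : Type} : Nat → List (List α) → List (List α)
  | 0, _ => []
  | n+1, rows => rows.filterMap List.head? :: pvZipGo n (rows.map List.tail)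

def pvZipRows {α : Type} (rows : List (List α)) : List (List α) :=
  pvZipGo (((rows.map List.length).min?).getD 0) rows

def qrlist_alt (k : String) : List String :=
  let rows := pvCharList.map (fun c =>
    pvTemplates.map (fun t => String.ofList (t.1.toList ++ k.toList ++ t.2.toList ++ [c])))
  (pvZipRows rows).flatten

-- ===== PRECONDITION & SPEC =====
def Spec_qrlist (k : String) (out : List String) : Prop := out = qrlist_alt k
instance (k : String) (out : List String) : Decidable (Spec_qrlist k out) := by unfold Spec_qrlist; infer_instance

-- ===== CLAIM (what is proved, stated in full; the proofs are below) =====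
def Claim_equal_qrlist : Prop := ∀ (k : String), Dom_qrlist k → Spec_qrlist k (qrlist k)

-- ===== LEMMAS AND PROOFS =====
theorem pvZipGo_map_map {α β γ : Type} (g : α → β → γ) (cs : List α) (ts : List β) :
    pvZipGo ts.length (cs.map (fun c => ts.map (g c))) =
      ts.map (fun t => cs.map (fun c => g c t)) := by
  induction ts with
  | nil => simp [pvZipGo]
  | cons t ts ih =>
    simp only [List.length_cons, pvZipGo, List.map_cons]
    congr 1
    · simp [List.filterMap_map, List.head?]
    · rw [List.map_map]
      simpa [Function.comp] using ih

theorem qrlist_eq_alt (k : String) : qrlist k = qrlist_alt k := by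
  show qrlist k = (pvZipRows _).flatten
  have hmin : ((( pvCharList.map (fun c =>
      pvTemplates.map (fun t => String.ofList (t.1.toList ++ k.toList ++ t.2.toList ++ [c])))).map
        List.length).min?).getD 0 = pvTemplates.length := by
    simp [pvCharList, pvTemplates, List.min?]
  rw [pvZipRows, hmin,
    pvZipGo_map_map (fun c t => String.ofList (t.1.toList ++ k.toList ++ t.2.toList ++ [c]))
      pvCharList pvTemplates]
  simp only [qrlist, pvCharList, pvTemplates, List.map_cons, List.map_nil, List.flatten,
    List.append_eq, List.append_nil, List.append_assoc, String.toList_empty, List.nil_append]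

-- ===== VERDICT (by name: the statement is the Claim_ definition above) =====
theorem qrlist_spec : Claim_equal_qrlist := by
  intro k _
  exact qrlist_eq_alt k
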